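-- pv_equiv track=rewrite | github.com/prabowo02/project_euler | codes/PE356.py | solve
-- ===== SOURCE A (Python) =====
-- def solve(n, k, mod=10**8):
--     mat = [
--       [pow(2, n, mod), 0, -n % mod],
--       [1, 0, 0],
--       [0, 1, 0],
--     ]
--
--     def multiply(A, B):
--         C = [[0, 0, 0], [0, 0, 0], [0, 0, 0]]
--         for i in range(3):
--             for j in range(3):
--                 for k in range(3):
--                     C[i][j] += A[i][k] * B[k][j]
--                 C[i][j] %= mod
--         return C
--
--     def power(A, n):
--         res = [[1, 0, 0], [0, 1, 0], [0, 0, 1]]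
--         while n > 0:
--             if n & 1:
--                 res = multiply(res, A)
--             n >>= 1
--             A = multiply(A, A)
--         return res
--
--     mat = power(mat, k - 2)
--     return (mat[0][0] * pow(2, n * 2, mod) + mat[0][1] * pow(2, n, mod) + mat[0][2] * 3 - 1) % mod
-- ===== SOURCE B (Python) =====
-- def solve(n, k, mod=10**8):
--     # Kitamasa: compute x^(k-2) modulo the characteristic polynomial
--     # x^3 - a*x^2 - c of the recurrence t_m = a*t_{m-1} + c*t_{m-3},
--     # then combine the residual polynomial with t_2, t_3, t_4.
--     a = pow(2, n, mod)
--     c = -n % mod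
--
--     def mulred(p, q):
--         # product of two degree<3 polynomials, reduced mod x^3 - a*x^2 - c
--         d0 = p[0] * q[0]
--         d1 = p[0] * q[1] + p[1] * q[0]
--         d2 = p[0] * q[2] + p[1] * q[1] + p[2] * q[0]
--         d3 = p[1] * q[2] + p[2] * q[1]
--         d4 = p[2] * q[2]
--         e3 = d3 + a * d4                      # x^4 = a*x^3 + c*x
--         return ((d0 + c * e3) % mod, (d1 + c * d4) % mod, (d2 + a * e3) % mod)
--
--     r = (1, 0, 0)
--     x = (0, 1, 0)
--     e = k - 2
--     while e > 0:
--         if e & 1: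
--             r = mulred(r, x)
--         e >>= 1
--         x = mulred(x, x)
--
--     t0, t1, t2 = 3, pow(2, n, mod), pow(2, 2 * n, mod)
--     t3 = (a * t2 + c * t0) % mod
--     t4 = (a * t3 + c * t1) % mod
--     return (r[0] * t2 + r[1] * t3 + r[2] * t4 - 1) % mod
-- ===== Notes on version B (the rewrite author's own statement) =====
-- stated objective: alternative
-- what changed: Replaces the 3x3 matrix binary exponentiation by the Kitamasa method: binary exponentiation of a degree<3 polynomial modulo the characteristic polynomial x^3 - a*x^2 - c (12 multiplications per step instead of 27), combining the residual polynomial with the sequence values t_2, t_3, t_4.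
-- outside the precondition, e.g. on solve(-1, 5, 5): A returns 2, B returns 2
import Mathlib
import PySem

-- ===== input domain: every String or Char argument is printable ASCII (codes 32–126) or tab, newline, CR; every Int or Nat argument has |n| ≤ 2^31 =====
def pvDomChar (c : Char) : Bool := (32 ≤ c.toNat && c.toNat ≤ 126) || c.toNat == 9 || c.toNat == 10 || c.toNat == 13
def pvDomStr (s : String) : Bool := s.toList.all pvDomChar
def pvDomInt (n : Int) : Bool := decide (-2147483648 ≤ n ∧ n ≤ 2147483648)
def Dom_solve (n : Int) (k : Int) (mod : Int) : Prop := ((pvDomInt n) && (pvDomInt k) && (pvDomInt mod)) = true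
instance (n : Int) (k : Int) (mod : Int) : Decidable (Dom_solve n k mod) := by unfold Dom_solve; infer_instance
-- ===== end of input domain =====

-- B replaces A's 3x3 matrix binary exponentiation by Kitamasa's method (binary
-- exponentiation of a polynomial modulo the characteristic polynomial): an
-- alternative algorithm of the same asymptotic cost with fewer multiplications per step.

abbrev R3 := Int × Int × Int
abbrev M3 := R3 × R3 × R3

-- ===== PORT A =====
-- multiply(A, B): the fixed range(3) loops are unrolled entrywise; each C[i][j]
-- is the accumulated sum of the three products, reduced by %= mod, exactly as the Python computes.
def pyMultiply (mod : Int) (A B : M3) : M3 :=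
  match A, B with
  | ((a00, a01, a02), (a10, a11, a12), (a20, a21, a22)),
    ((b00, b01, b02), (b10, b11, b12), (b20, b21, b22)) =>
    ((PySem.Int.mod (a00 * b00 + a01 * b10 + a02 * b20) mod,
      PySem.Int.mod (a00 * b01 + a01 * b11 + a02 * b21) mod,
      PySem.Int.mod (a00 * b02 + a01 * b12 + a02 * b22) mod),
     (PySem.Int.mod (a10 * b00 + a11 * b10 + a12 * b20) mod,
      PySem.Int.mod (a10 * b01 + a11 * b11 + a12 * b21) mod,
      PySem.Int.mod (a10 * b02 + a11 * b12 + a12 * b22) mod),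
     (PySem.Int.mod (a20 * b00 + a21 * b10 + a22 * b20) mod,
      PySem.Int.mod (a20 * b01 + a21 * b11 + a22 * b21) mod,
      PySem.Int.mod (a20 * b02 + a21 * b12 + a22 * b22) mod))

-- power(A, n): while n > 0: if n & 1: res = multiply(res, A); n >>= 1; A = multiply(A, A)
def pyPowerLoop (mod : Int) (res A : M3) (e : Int) : M3 :=
  if _h : 0 < e then
    pyPowerLoop mod (if PySem.Int.band e 1 ≠ 0 then pyMultiply mod res A else res)
      (pyMultiply mod A A) (e >>> (1 : Nat))
  else res
  termination_by e.toNat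
  decreasing_by
    rw [Int.shiftRight_eq_div_pow]
    omega

def solve (n : Int) (k : Int) (mod : Int) : Int :=
  let mat : M3 := ((PySem.Int.powMod 2 n.toNat mod, 0, PySem.Int.mod (-n) mod),
                   (1, 0, 0),
                   (0, 1, 0))
  let mat := pyPowerLoop mod ((1, 0, 0), (0, 1, 0), (0, 0, 1)) mat (k - 2)
  PySem.Int.mod (mat.1.1 * PySem.Int.powMod 2 (n * 2).toNat mod
      + mat.1.2.1 * PySem.Int.powMod 2 n.toNat mod + mat.1.2.2 * 3 - 1) mod

-- ===== PORT B =====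
-- mulred(p, q): product of two degree<3 polynomials, reduced mod x^3 - a*x^2 - c
def kitMulRed (mod a c : Int) (p q : R3) : R3 :=
  match p, q with
  | (p0, p1, p2), (q0, q1, q2) =>
    let d0 := p0 * q0
    let d1 := p0 * q1 + p1 * q0
    let d2 := p0 * q2 + p1 * q1 + p2 * q0
    let d3 := p1 * q2 + p2 * q1
    let d4 := p2 * q2
    let e3 := d3 + a * d4
    (PySem.Int.mod (d0 + c * e3) mod, PySem.Int.mod (d1 + c * d4) mod,
     PySem.Int.mod (d2 + a * e3) mod)

-- while e > 0: if e & 1: r = mulred(r, x); e >>= 1; x = mulred(x, x)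
def kitLoop (mod a c : Int) (r x : R3) (e : Int) : R3 :=
  if _h : 0 < e then
    kitLoop mod a c (if PySem.Int.band e 1 ≠ 0 then kitMulRed mod a c r x else r)
      (kitMulRed mod a c x x) (e >>> (1 : Nat))
  else r
  termination_by e.toNat
  decreasing_by
    rw [Int.shiftRight_eq_div_pow]
    omega

def solve_alt (n : Int) (k : Int) (mod : Int) : Int :=
  let a := PySem.Int.powMod 2 n.toNat mod
  let c := PySem.Int.mod (-n) mod
  let r := kitLoop mod a c (1, 0, 0) (0, 1, 0) (k - 2)
  let t0 : Int := 3
  let t1 := PySem.Int.powMod 2 n.toNat mod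
  let t2 := PySem.Int.powMod 2 (2 * n).toNat mod
  let t3 := PySem.Int.mod (a * t2 + c * t0) mod
  let t4 := PySem.Int.mod (a * t3 + c * t1) mod
  PySem.Int.mod (r.1 * t2 + r.2.1 * t3 + r.2.2 * t4 - 1) mod

-- ===== PRECONDITION & SPEC =====
-- Pre_ excludes n < 0, where pow(2, n, mod) takes Python's modular-inverse path
-- (ValueError whenever gcd(2, mod) ≠ 1), and mod = 0, where pow raises ValueError.
def Pre_solve (n : Int) (k : Int) (mod : Int) : Prop := 0 ≤ n ∧ mod ≠ 0
instance (n : Int) (k : Int) (mod : Int) : Decidable (Pre_solve n k mod) := by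
  unfold Pre_solve; infer_instance

def pvWitness_solve : Int × Int × Int := (3, 5, 97)

def Spec_solve (n : Int) (k : Int) (mod : Int) (out : Int) : Prop := out = solve_alt n k mod
instance (n : Int) (k : Int) (mod : Int) (out : Int) : Decidable (Spec_solve n k mod out) := by
  unfold Spec_solve; infer_instance

-- ===== CLAIM (what is proved, stated in full; the proofs are below) =====
def Claim_equal_solve : Prop := ∀ (n : Int) (k : Int) (mod : Int),
  Dom_solve n k mod → Pre_solve n k mod → Spec_solve n k mod (solve n k mod)

-- ===== LEMMAS AND PROOFS =====

-- ZMod-side shadow structures (defined via projections so they reduce on variables)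
abbrev ZR3 (m : Nat) := ZMod m × ZMod m × ZMod m
abbrev ZM3 (m : Nat) := ZR3 m × ZR3 m × ZR3 m

def tcast (mod : Int) (p : R3) : ZR3 mod.natAbs :=
  ((p.1 : ZMod mod.natAbs), (p.2.1 : ZMod mod.natAbs), (p.2.2 : ZMod mod.natAbs))

def mcast (mod : Int) (A : M3) : ZM3 mod.natAbs :=
  (tcast mod A.1, tcast mod A.2.1, tcast mod A.2.2)

def zmul {m : Nat} (A B : ZM3 m) : ZM3 m :=
  ((A.1.1*B.1.1 + A.1.2.1*B.2.1.1 + A.1.2.2*B.2.2.1,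
    A.1.1*B.1.2.1 + A.1.2.1*B.2.1.2.1 + A.1.2.2*B.2.2.2.1,
    A.1.1*B.1.2.2 + A.1.2.1*B.2.1.2.2 + A.1.2.2*B.2.2.2.2),
   (A.2.1.1*B.1.1 + A.2.1.2.1*B.2.1.1 + A.2.1.2.2*B.2.2.1,
    A.2.1.1*B.1.2.1 + A.2.1.2.1*B.2.1.2.1 + A.2.1.2.2*B.2.2.2.1,
    A.2.1.1*B.1.2.2 + A.2.1.2.1*B.2.1.2.2 + A.2.1.2.2*B.2.2.2.2),
   (A.2.2.1*B.1.1 + A.2.2.2.1*B.2.1.1 + A.2.2.2.2*B.2.2.1,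
    A.2.2.1*B.1.2.1 + A.2.2.2.1*B.2.1.2.1 + A.2.2.2.2*B.2.2.2.1,
    A.2.2.1*B.1.2.2 + A.2.2.2.1*B.2.1.2.2 + A.2.2.2.2*B.2.2.2.2))

def zmulred {m : Nat} (a c : ZMod m) (p q : ZR3 m) : ZR3 m :=
  (p.1*q.1 + c*((p.2.1*q.2.2 + p.2.2*q.2.1) + a*(p.2.2*q.2.2)),
   (p.1*q.2.1 + p.2.1*q.1) + c*(p.2.2*q.2.2),
   (p.1*q.2.2 + p.2.1*q.2.1 + p.2.2*q.1) + a*((p.2.1*q.2.2 + p.2.2*q.2.1) + a*(p.2.2*q.2.2)))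

-- ψ p = p0·I + p1·M + p2·M² for the companion matrix M = [[a,0,c],[1,0,0],[0,1,0]]
def psi {m : Nat} (a c : ZMod m) (p : ZR3 m) : ZM3 m :=
  ((p.1 + p.2.1*a + p.2.2*a*a, p.2.2*c, p.2.1*c + p.2.2*a*c),
   (p.2.1 + p.2.2*a, p.1, p.2.2*c),
   (p.2.2, p.2.1, p.1))

theorem cast_pymod (mod x : Int) :
    ((PySem.Int.mod x mod : Int) : ZMod mod.natAbs) = (x : ZMod mod.natAbs) := by
  have hm0 : ((mod : Int) : ZMod mod.natAbs) = 0 := by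
    rw [ZMod.intCast_zmod_eq_zero_iff_dvd]
    exact Int.natAbs_dvd.mpr dvd_rfl
  have h := PySem.Int.floordiv_mul_add_mod x mod
  have : PySem.Int.mod x mod = x - PySem.Int.floordiv x mod * mod := by omega
  rw [this, Int.cast_sub, Int.cast_mul, hm0]
  ring

theorem pymod_congr (mod x y : Int) (hm : mod ≠ 0)
    (h : (x : ZMod mod.natAbs) = (y : ZMod mod.natAbs)) :
    PySem.Int.mod x mod = PySem.Int.mod y mod := by
  have hd : mod ∣ (y - x) := by
    rw [ZMod.intCast_eq_intCast_iff] at h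
    exact Int.natAbs_dvd.mp h.dvd
  have hx := PySem.Int.floordiv_mul_add_mod x mod
  have hy := PySem.Int.floordiv_mul_add_mod y mod
  have hd2 : mod ∣ (PySem.Int.mod y mod - PySem.Int.mod x mod) := by
    obtain ⟨t, ht⟩ := hd
    exact ⟨t + (PySem.Int.floordiv x mod - PySem.Int.floordiv y mod), by linear_combination ht - hx + hy⟩
  have hz : PySem.Int.mod y mod - PySem.Int.mod x mod = 0 := by
    rcases lt_or_gt_of_ne hm with hneg | hpos
    · have b1 := PySem.Int.mod_neg_bounds x hneg
      have b2 := PySem.Int.mod_neg_bounds y hneg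
      have := Int.eq_zero_of_abs_lt_dvd (neg_dvd.mpr hd2) (by rw [abs_lt]; omega)
      omega
    · have b1 := PySem.Int.mod_nonneg x hpos
      have b2 := PySem.Int.mod_lt x hpos
      have b3 := PySem.Int.mod_nonneg y hpos
      have b4 := PySem.Int.mod_lt y hpos
      exact Int.eq_zero_of_abs_lt_dvd hd2 (by rw [abs_lt]; omega)
  omega

theorem mcast_multiply (mod : Int) (A B : M3) :
    mcast mod (pyMultiply mod A B) = zmul (mcast mod A) (mcast mod B) := by
  obtain ⟨⟨a00, a01, a02⟩, ⟨a10, a11, a12⟩, ⟨a20, a21, a22⟩⟩ := A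
  obtain ⟨⟨b00, b01, b02⟩, ⟨b10, b11, b12⟩, ⟨b20, b21, b22⟩⟩ := B
  simp only [pyMultiply, mcast, tcast, zmul, cast_pymod, Int.cast_add, Int.cast_mul]

theorem tcast_mulred (mod a c : Int) (p q : R3) :
    tcast mod (kitMulRed mod a c p q) =
      zmulred (a : ZMod mod.natAbs) (c : ZMod mod.natAbs) (tcast mod p) (tcast mod q) := by
  obtain ⟨p0, p1, p2⟩ := p
  obtain ⟨q0, q1, q2⟩ := q
  simp only [kitMulRed, tcast, zmulred, cast_pymod, Int.cast_add, Int.cast_mul]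

theorem psi_hom {m : Nat} (a c : ZMod m) (p q : ZR3 m) :
    psi a c (zmulred a c p q) = zmul (psi a c p) (psi a c q) := by
  simp only [psi, zmulred, zmul, Prod.mk.injEq]
  refine ⟨⟨by ring, by ring, by ring⟩, ⟨by ring, by ring, by ring⟩, by ring, by ring, by ring⟩

theorem loop_pair (mod aI cI : Int) (N : Nat) :
    ∀ (e : Int) (res X : M3) (r x : R3), e.toNat ≤ N →
    mcast mod res = psi (aI : ZMod mod.natAbs) (cI : ZMod mod.natAbs) (tcast mod r) →
    mcast mod X = psi (aI : ZMod mod.natAbs) (cI : ZMod mod.natAbs) (tcast mod x) →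
    mcast mod (pyPowerLoop mod res X e) =
      psi (aI : ZMod mod.natAbs) (cI : ZMod mod.natAbs)
        (tcast mod (kitLoop mod aI cI r x e)) := by
  induction N with
  | zero =>
    intro e res X r x hN hres hX
    rw [pyPowerLoop, kitLoop]
    split_ifs with hpos hbit
    · exact absurd hpos (by omega)
    · exact absurd hpos (by omega)
    · exact hres
  | succ n ih =>
    intro e res X r x hN hres hX
    rw [pyPowerLoop, kitLoop]
    split_ifs with hpos hbit
    · refine ih _ _ _ _ _ (by rw [Int.shiftRight_eq_div_pow]; omega) ?_ ?_
      · rw [mcast_multiply, tcast_mulred, psi_hom, hres, hX]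
      · rw [mcast_multiply, tcast_mulred, psi_hom, hX]
    · refine ih _ _ _ _ _ (by rw [Int.shiftRight_eq_div_pow]; omega) ?_ ?_
      · exact hres
      · rw [mcast_multiply, tcast_mulred, psi_hom, hX]
    · exact hres

-- ===== VERDICT (by name: the statement is the Claim_ definition above) =====
set_option maxHeartbeats 1000000 in
theorem solve_spec : Claim_equal_solve := by
  intro n k mod _ hpre
  obtain ⟨hn, hm⟩ := hpre
  unfold Spec_solve solve solve_alt
  apply pymod_congr mod _ _ hm
  have hinv1 : mcast mod ((1, 0, 0), (0, 1, 0), (0, 0, 1)) =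
      psi ((PySem.Int.powMod 2 n.toNat mod : Int) : ZMod mod.natAbs)
        ((PySem.Int.mod (-n) mod : Int) : ZMod mod.natAbs) (tcast mod (1, 0, 0)) := by
    simp only [mcast, tcast, psi, Int.cast_one, Int.cast_zero]
    ring_nf
  have hinv2 : mcast mod ((PySem.Int.powMod 2 n.toNat mod, 0, PySem.Int.mod (-n) mod),
        (1, 0, 0), (0, 1, 0)) =
      psi ((PySem.Int.powMod 2 n.toNat mod : Int) : ZMod mod.natAbs)
        ((PySem.Int.mod (-n) mod : Int) : ZMod mod.natAbs) (tcast mod (0, 1, 0)) := by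
    simp only [mcast, tcast, psi, Int.cast_one, Int.cast_zero]
    ring_nf
  have h := loop_pair mod (PySem.Int.powMod 2 n.toNat mod) (PySem.Int.mod (-n) mod)
    (k - 2).toNat (k - 2) ((1, 0, 0), (0, 1, 0), (0, 0, 1))
    ((PySem.Int.powMod 2 n.toNat mod, 0, PySem.Int.mod (-n) mod), (1, 0, 0), (0, 1, 0))
    (1, 0, 0) (0, 1, 0) le_rfl hinv1 hinv2
  rw [Int.mul_comm n 2]
  generalize hMf : pyPowerLoop mod ((1, 0, 0), (0, 1, 0), (0, 0, 1))
    ((PySem.Int.powMod 2 n.toNat mod, 0, PySem.Int.mod (-n) mod), (1, 0, 0), (0, 1, 0))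
    (k - 2) = Mf at h ⊢
  generalize hRf : kitLoop mod (PySem.Int.powMod 2 n.toNat mod) (PySem.Int.mod (-n) mod)
    (1, 0, 0) (0, 1, 0) (k - 2) = rf at h ⊢
  obtain ⟨⟨m00, m01, m02⟩, ⟨m10, m11, m12⟩, ⟨m20, m21, m22⟩⟩ := Mf
  obtain ⟨r0, r1, r2⟩ := rf
  simp only [mcast, tcast, psi, Prod.mk.injEq] at h
  obtain ⟨⟨h00, h01, h02⟩, -⟩ := h
  simp only [Int.cast_add, Int.cast_mul, Int.cast_sub, Int.cast_one, Int.cast_ofNat]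
  rw [h00, h01, h02]
  simp only [cast_pymod, Int.cast_add, Int.cast_mul, Int.cast_neg, Int.cast_ofNat]
  ring
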